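-- pv_equiv track=rewrite | github.com/WinnaJane/Code-Challenge | 22.py | checkStepNumbers
-- ===== SOURCE A (Python) =====
-- def checkStepNumbers(systemNames, stepNumbers):
--     systems = {}
--     for system, step in zip(systemNames, stepNumbers):
--         if system not in systems:
--             systems[system] = [step]
--         else:
--             systems[system].append(step)
--
--     for system in systems:
--         steps = systems[system]
--         if any([step <= steps[i-1] for i, step in enumerate(steps)][1:]):
--             return False
--     return True
-- ===== SOURCE B (Python) =====
-- def checkStepNumbers(systemNames, stepNumbers):
--     last = {}
--     for system, step in zip(systemNames, stepNumbers):
--         if system in last and step <= last[system]: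
--             return False
--         last[system] = step
--     return True
-- ===== Notes on version B (the rewrite author's own statement) =====
-- stated objective: simpler
-- what changed: Instead of grouping all steps per system into lists and then scanning each group for a non-increasing adjacent pair, B keeps only the last step seen per system in a dict and rejects in a single early-exiting pass over zip(systemNames, stepNumbers).
import Mathlib
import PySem

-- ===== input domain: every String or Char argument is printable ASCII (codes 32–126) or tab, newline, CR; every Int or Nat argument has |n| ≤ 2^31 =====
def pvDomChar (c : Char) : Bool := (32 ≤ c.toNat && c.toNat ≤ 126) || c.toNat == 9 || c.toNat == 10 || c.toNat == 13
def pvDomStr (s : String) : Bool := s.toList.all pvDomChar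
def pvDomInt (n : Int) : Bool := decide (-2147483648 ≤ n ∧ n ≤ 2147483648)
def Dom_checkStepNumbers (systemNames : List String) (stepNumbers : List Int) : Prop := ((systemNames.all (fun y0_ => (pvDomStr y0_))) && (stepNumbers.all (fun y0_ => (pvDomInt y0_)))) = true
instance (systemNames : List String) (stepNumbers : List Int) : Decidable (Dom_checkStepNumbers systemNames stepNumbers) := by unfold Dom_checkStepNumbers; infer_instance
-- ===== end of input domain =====

-- B replaces A's group-then-scan (full per-system step lists, checked afterwards) by a single
-- early-exiting pass that keeps only the last step per system; objective: simpler.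

-- ===== PORT A =====
-- A's inner membership test `steps[i-1]` is in range for every produced index (i ≥ 1 after the
-- [1:] slice, and i = 0 only occurs when steps is nonempty so steps[-1] exists), so pyGetD's
-- default 0 is never the value used by an entry that survives the slice; exact on all inputs.
def checkStepNumbersGroup (systemNames : List String) (stepNumbers : List Int) :
    PySem.Dict String (List Int) :=
  (systemNames.zip stepNumbers).foldl
    (fun d p => if d.contains p.1 then d.modify p.1 [] (fun xs => xs ++ [p.2])
                else d.insert p.1 [p.2])
    PySem.Dict.empty

def checkStepNumbersInner (steps : List Int) : Bool :=
  (PySem.List.slice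
      ((PySem.List.enumerate steps).map
        (fun p => decide (p.2 ≤ PySem.List.pyGetD steps (p.1 - 1) 0)))
      (some 1) none).any id

def checkStepNumbers (systemNames : List String) (stepNumbers : List Int) : Bool :=
  let systems := checkStepNumbersGroup systemNames stepNumbers
  systems.keys.all (fun s => !(checkStepNumbersInner (systems.getD s [])))

-- ===== PORT B =====
def checkStepNumbersAltGo (last : PySem.Dict String Int) : List (String × Int) → Bool
  | [] => true
  | (s, x) :: rest =>
    match last.get? s with
    | some v => if x ≤ v then false else checkStepNumbersAltGo (last.insert s x) rest
    | none => checkStepNumbersAltGo (last.insert s x) rest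

def checkStepNumbers_alt (systemNames : List String) (stepNumbers : List Int) : Bool :=
  checkStepNumbersAltGo PySem.Dict.empty (systemNames.zip stepNumbers)

-- ===== PRECONDITION & SPEC =====
def Spec_checkStepNumbers (systemNames : List String) (stepNumbers : List Int) (out : Bool) : Prop := out = checkStepNumbers_alt systemNames stepNumbers
instance (systemNames : List String) (stepNumbers : List Int) (out : Bool) : Decidable (Spec_checkStepNumbers systemNames stepNumbers out) := by unfold Spec_checkStepNumbers; infer_instance

-- ===== CLAIM (what is proved, stated in full; the proofs are below) =====
def Claim_equal_checkStepNumbers : Prop := ∀ (systemNames : List String) (stepNumbers : List Int), Dom_checkStepNumbers systemNames stepNumbers → Spec_checkStepNumbers systemNames stepNumbers (checkStepNumbers systemNames stepNumbers)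

-- ===== LEMMAS AND PROOFS =====

-- steps of system s, in order
def pvProj (s : String) (l : List (String × Int)) : List Int :=
  (l.filter (fun p => p.1 == s)).map (fun p => p.2)

-- "strictly increasing, and (if o = some v) the first element exceeds v"
def pvIncr : Option Int → List Int → Bool
  | _, [] => true
  | none, x :: xs => pvIncr (some x) xs
  | some v, x :: xs => decide (v < x) && pvIncr (some x) xs

theorem pvProj_cons_self (s : String) (x : Int) (l : List (String × Int)) :
    pvProj s ((s, x) :: l) = x :: pvProj s l := by
  simp [pvProj]

theorem pvProj_cons_ne (s t : String) (x : Int) (l : List (String × Int))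
    (h : s ≠ t) : pvProj t ((s, x) :: l) = pvProj t l := by
  simp [pvProj, h]

-- B's loop invariant
theorem altGo_iff (l : List (String × Int)) (last : PySem.Dict String Int) :
    checkStepNumbersAltGo last l = true ↔
      ∀ t, pvIncr (last.get? t) (pvProj t l) = true := by
  induction l generalizing last with
  | nil => simp [checkStepNumbersAltGo, pvProj, pvIncr]
  | cons p rest ih =>
    obtain ⟨s, x⟩ := p
    cases hv : last.get? s with
    | some v =>
      by_cases hle : x ≤ v
      · simp only [checkStepNumbersAltGo, hv, if_pos hle]
        constructor
        · intro h; cases h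
        · intro h
          have := h s
          rw [pvProj_cons_self, hv] at this
          simp only [pvIncr, Bool.and_eq_true, decide_eq_true_eq] at this
          omega
      · simp only [checkStepNumbersAltGo, hv, if_neg hle]
        rw [ih]
        constructor
        · intro h t
          by_cases hts : s = t
          · subst hts
            have := h s
            rw [PySem.Dict.get?_insert_self] at this
            rw [pvProj_cons_self, hv]
            simp only [pvIncr, Bool.and_eq_true, decide_eq_true_eq]
            exact ⟨by omega, this⟩
          · have := h t
            rw [PySem.Dict.get?_insert_of_ne _ _ (fun he => hts he.symm)] at this
            rwa [pvProj_cons_ne _ _ _ _ hts]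
        · intro h t
          by_cases hts : t = s
          · subst hts
            have := h t
            rw [pvProj_cons_self, hv] at this
            simp only [pvIncr, Bool.and_eq_true] at this
            rw [PySem.Dict.get?_insert_self]
            exact this.2
          · have := h t
            rw [pvProj_cons_ne _ _ _ _ (fun he => hts he.symm)] at this
            rwa [PySem.Dict.get?_insert_of_ne _ _ hts]
    | none =>
      simp only [checkStepNumbersAltGo, hv]
      rw [ih]
      constructor
      · intro h t
        by_cases hts : s = t
        · subst hts
          have := h s
          rw [PySem.Dict.get?_insert_self] at this
          rw [pvProj_cons_self, hv]
          simpa [pvIncr] using this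
        · have := h t
          rw [PySem.Dict.get?_insert_of_ne _ _ (fun he => hts he.symm)] at this
          rwa [pvProj_cons_ne _ _ _ _ hts]
      · intro h t
        by_cases hts : t = s
        · subst hts
          have := h t
          rw [pvProj_cons_self, hv] at this
          simp only [pvIncr] at this
          rw [PySem.Dict.get?_insert_self]
          exact this
        · have := h t
          rw [pvProj_cons_ne _ _ _ _ (fun he => hts he.symm)] at this
          rwa [PySem.Dict.get?_insert_of_ne _ _ hts]

-- pvIncr vs IsChain
theorem pvIncr_some_iff (t : List Int) (v : Int) :
    pvIncr (some v) t = true ↔ t.IsChain (· < ·) ∧ ∀ y ∈ t.head?, v < y := by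
  induction t generalizing v with
  | nil => simp [pvIncr]
  | cons y r ih =>
    simp only [pvIncr, Bool.and_eq_true, decide_eq_true_eq, ih,
      List.isChain_cons (l := r), List.head?_cons, Option.mem_def, Option.some.injEq]
    constructor
    · rintro ⟨h1, h2, h3⟩
      exact ⟨⟨h3, h2⟩, fun z hz => by omega⟩
    · rintro ⟨⟨h3, h2⟩, h4⟩
      exact ⟨h4 y rfl, h2, h3⟩

theorem pvIncr_none_iff (xs : List Int) :
    pvIncr none xs = true ↔ xs.IsChain (· < ·) := by
  cases xs with
  | nil => simp [pvIncr, List.IsChain.nil]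
  | cons x t =>
    simp only [pvIncr, pvIncr_some_iff, List.isChain_cons (l := t), Option.mem_def]
    tauto

-- A's comprehension, after the [1:] slice, is the adjacent-pair comparison list
theorem innerA_eq (steps : List Int) :
    checkStepNumbersInner steps =
      ((steps.zip steps.tail).map (fun p => decide (p.2 ≤ p.1))).any id := by
  unfold checkStepNumbersInner
  rw [PySem.List.slice_from_one, PySem.List.enumerate_eq_zipIdx_map]
  congr 1
  apply List.ext_getElem
  · simp
  · intro j h1 h2
    simp only [List.getElem_tail, List.getElem_map, List.getElem_zip, List.getElem_zipIdx]
    have hjl : j + 1 < steps.length := by simp at h1; omega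
    have hc : (0 : Int) + (↑(0 + (j + 1)) : Int) - 1 = (j : Int) := by push_cast; ring
    rw [hc, PySem.List.pyGetD_natCast]
    have hj : j < steps.length := by omega
    simp [List.getD, List.getElem?_eq_getElem hj]

-- adjacent-pair scan vs Chain'
theorem pairAny_iff (steps : List Int) :
    (((steps.zip steps.tail).map (fun p => decide (p.2 ≤ p.1))).any id = false) ↔
      steps.IsChain (· < ·) := by
  induction steps with
  | nil => simp
  | cons x t ih =>
    cases t with
    | nil => simp
    | cons y r =>
      simp only [List.tail_cons, List.zip_cons_cons, List.map_cons, List.any_cons, id,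
        Bool.or_eq_false_iff, decide_eq_false_iff_not, not_le, List.isChain_cons_cons] at *
      rw [ih]

-- A's result, characterised
theorem portA_iff (systemNames : List String) (stepNumbers : List Int) :
    checkStepNumbers systemNames stepNumbers = true ↔
      ∀ t, (pvProj t (systemNames.zip stepNumbers)).IsChain (· < ·) := by
  unfold checkStepNumbers
  set l := systemNames.zip stepNumbers with hl
  have hfold : checkStepNumbersGroup systemNames stepNumbers =
      l.foldl (fun d p => d.modify p.1 [] (fun xs => xs ++ [p.2])) PySem.Dict.empty := by
    unfold checkStepNumbersGroup
    congr 1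
    funext d p
    by_cases h : d.contains p.1 = true
    · simp [PySem.Dict.modify, h]
    · have hc : d.contains p.1 = false := by simpa using h
      rw [if_neg h]
      simp [PySem.Dict.modify, PySem.Dict.getD_of_not_contains _ _ hc]
  have hgetD : ∀ t, (checkStepNumbersGroup systemNames stepNumbers).getD t [] = pvProj t l := by
    intro t
    rw [hfold, PySem.Dict.getD_foldl_modify_append]
    simp [pvProj, PySem.Dict.getD_empty]
  have hkeys : ∀ t, t ∈ (checkStepNumbersGroup systemNames stepNumbers).keys ↔ t ∈ l.map (fun p => p.1) := by
    intro t
    rw [hfold]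
    rw [PySem.Dict.keys_foldl_modify_key l (fun p => p.1) [] (fun _ p xs => xs ++ [p.2])]
    rw [PySem.Set.mem_update]
    simp [PySem.Dict.keys_empty]
  simp only [List.all_eq_true, Bool.not_eq_eq_eq_not, Bool.not_true]
  constructor
  · intro h t
    by_cases hm : t ∈ l.map (fun p => p.1)
    · have := h t ((hkeys t).2 hm)
      rw [hgetD t, innerA_eq] at this
      exact (pairAny_iff _).1 this
    · have : pvProj t l = [] := by
        simp only [List.mem_map, not_exists, not_and] at hm
        simp only [pvProj, List.map_eq_nil_iff, List.filter_eq_nil_iff, beq_iff_eq]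
        intro p hp he
        exact (hm p hp) he
      rw [this]; exact List.IsChain.nil
  · intro h t ht
    rw [hgetD t, innerA_eq]
    exact (pairAny_iff _).2 (h t)

-- ===== VERDICT (by name: the statement is the Claim_ definition above) =====
theorem checkStepNumbers_spec : Claim_equal_checkStepNumbers := by
  intro systemNames stepNumbers _
  unfold Spec_checkStepNumbers checkStepNumbers_alt
  rcases hA : checkStepNumbers systemNames stepNumbers with _ | _
  · rcases hB : checkStepNumbersAltGo PySem.Dict.empty (systemNames.zip stepNumbers) with _ | _
    · rfl
    · exfalso
      have := (altGo_iff _ _).1 hB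
      have hall : ∀ t, pvIncr none (pvProj t (systemNames.zip stepNumbers)) = true := by
        intro t; simpa [PySem.Dict.get?_empty] using this t
      have : checkStepNumbers systemNames stepNumbers = true :=
        (portA_iff _ _).2 (fun t => (pvIncr_none_iff _).1 (hall t))
      simp [hA] at this
  · have h := (portA_iff _ _).1 hA
    have : checkStepNumbersAltGo PySem.Dict.empty (systemNames.zip stepNumbers) = true := by
      rw [altGo_iff]
      intro t
      rw [PySem.Dict.get?_empty]
      exact (pvIncr_none_iff _).2 (h t)
    exact this.symm
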